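-- pv_equiv track=rewrite | github.com/tomkoelman/nice_duration | src/nice_duration/nice_duration.py | _keep_specified_zeroes
-- ===== SOURCE A (Python) =====
-- def _keep_specified_zeroes(
--     values, leading_zeroes=False, trailing_zeroes=False, infix_zeroes=False
-- ):
--     """Given a values list, which is a list of pairs of units and amounts,
--     return a values list that has leading zeroes removed (if
--     requested), trailing zeroes removed (if requested) and infix
--     zeroes remove (if requested).
--     """
--
--     non_zero_indices = [i for i, (_, value) in enumerate(values) if value]
--
--     if not non_zero_indices:
--         # If all values are zero, keep them all if any flag is set.
--         return values if any([leading_zeroes, trailing_zeroes, infix_zeroes]) else []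
--
--     first_non_zero_index = non_zero_indices[0]
--     last_non_zero_index = non_zero_indices[-1]
--
--     result = []
--     for i, pair in enumerate(values):
--         if pair[1] != 0:
--             result.append(pair)
--             continue
--
--         # It's a zero value, decide whether to keep it.
--         is_leading = i < first_non_zero_index
--         is_trailing = i > last_non_zero_index
--         is_infix = first_non_zero_index < i < last_non_zero_index
--
--         if (
--             (is_leading and leading_zeroes)
--             or (is_trailing and trailing_zeroes)
--             or (is_infix and infix_zeroes)
--         ):
--             result.append(pair)
--
--     return result
-- ===== SOURCE B (Python) =====
-- def _keep_specified_zeroes(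
--     values, leading_zeroes=False, trailing_zeroes=False, infix_zeroes=False
-- ):
--     # State-machine pass: tag each pair (backward scan) with whether a non-zero
--     # value occurs strictly to its right, then classify in one forward scan by
--     # (seen non-zero to the left, non-zero to the right) -- no index arithmetic.
--     tagged = []
--     nz_right = False
--     for pair in reversed(values):
--         tagged.append((pair, nz_right))
--         nz_right = nz_right or pair[1] != 0
--     tagged.reverse()
--
--     result = []
--     nz_left = False
--     for pair, nz_right in tagged:
--         if pair[1] != 0:
--             result.append(pair)
--             nz_left = True
--         else:
--             keep = (
--                 (not nz_left and nz_right and leading_zeroes)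
--                 or (nz_left and nz_right and infix_zeroes)
--                 or (nz_left and not nz_right and trailing_zeroes)
--                 or (not nz_left and not nz_right
--                     and (leading_zeroes or trailing_zeroes or infix_zeroes))
--             )
--             if keep:
--                 result.append(pair)
--     return result
-- ===== Notes on version B (the rewrite author's own statement) =====
-- stated objective: alternative
-- what changed: B never computes the non-zero index list or compares positions: a backward scan tags each pair with 'non-zero exists to the right', then a forward state-machine scan with a 'non-zero seen to the left' flag classifies every zero from the two booleans (leading/infix/trailing/all-zero), which also subsumes A's separate all-zero early return.
import Mathlib
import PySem

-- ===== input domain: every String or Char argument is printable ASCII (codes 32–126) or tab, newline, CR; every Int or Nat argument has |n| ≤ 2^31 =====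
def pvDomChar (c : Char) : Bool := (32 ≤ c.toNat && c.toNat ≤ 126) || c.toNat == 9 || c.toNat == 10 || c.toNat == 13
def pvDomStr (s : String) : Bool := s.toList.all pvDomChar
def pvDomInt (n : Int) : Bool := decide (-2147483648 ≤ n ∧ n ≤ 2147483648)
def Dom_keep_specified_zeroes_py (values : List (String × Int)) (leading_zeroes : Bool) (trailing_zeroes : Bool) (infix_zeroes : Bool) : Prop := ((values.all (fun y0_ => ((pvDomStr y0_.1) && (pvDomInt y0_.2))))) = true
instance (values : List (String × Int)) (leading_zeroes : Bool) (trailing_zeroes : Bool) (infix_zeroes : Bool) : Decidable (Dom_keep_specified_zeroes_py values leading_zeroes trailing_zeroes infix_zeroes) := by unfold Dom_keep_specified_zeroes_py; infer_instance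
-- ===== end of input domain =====

-- B replaces A's non-zero-index list and position comparisons by a two-direction state
-- machine: a backward tagging scan plus a forward classifying scan (objective: alternative).

-- ===== PORT A =====
-- the comprehension `[i for i, (_, value) in enumerate(values) if value]`
def pvNZ (values : List (String × Int)) : List Int :=
  ((PySem.List.enumerate values).filter (fun p => p.2.2 != 0)).map (·.1)

def keep_specified_zeroes_py (values : List (String × Int)) (leading_zeroes : Bool) (trailing_zeroes : Bool) (infix_zeroes : Bool) : List (String × Int) :=
  match pvNZ values with
  | [] => if leading_zeroes || trailing_zeroes || infix_zeroes then values else []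
  | f :: rest =>
    -- non_zero_indices[0] = f, non_zero_indices[-1] = rest.getLastD f
    let l := rest.getLastD f
    (PySem.List.enumerate values).foldl
      (fun result x =>
        if x.2.2 ≠ 0 then result ++ [x.2]
        else
          let is_leading := decide (x.1 < f)
          let is_trailing := decide (l < x.1)
          let is_infix := decide (f < x.1) && decide (x.1 < l)
          if (is_leading && leading_zeroes) || (is_trailing && trailing_zeroes)
             || (is_infix && infix_zeroes)
          then result ++ [x.2] else result) []

-- ===== PORT B =====
def keep_specified_zeroes_py_alt (values : List (String × Int)) (leading_zeroes : Bool) (trailing_zeroes : Bool) (infix_zeroes : Bool) : List (String × Int) :=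
  -- backward scan: for pair in reversed(values): tagged.append((pair, nz_right)); …; tagged.reverse()
  let tagged :=
    ((values.reverse.foldl
        (fun (st : List ((String × Int) × Bool) × Bool) pair =>
          (st.1 ++ [(pair, st.2)], st.2 || pair.2 != 0)) ([], false)).1).reverse
  -- forward scan with the nz_left flag
  (tagged.foldl
    (fun (st : List (String × Int) × Bool) x =>
      if x.1.2 != 0 then (st.1 ++ [x.1], true)
      else
        let keep := (!st.2 && x.2 && leading_zeroes) || (st.2 && x.2 && infix_zeroes)
          || (st.2 && !x.2 && trailing_zeroes)
          || (!st.2 && !x.2 && (leading_zeroes || trailing_zeroes || infix_zeroes))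
        (if keep then st.1 ++ [x.1] else st.1, st.2)) ([], false)).1

-- ===== PRECONDITION & SPEC =====
def Spec_keep_specified_zeroes_py (values : List (String × Int)) (leading_zeroes : Bool) (trailing_zeroes : Bool) (infix_zeroes : Bool) (out : List (String × Int)) : Prop := out = keep_specified_zeroes_py_alt values leading_zeroes trailing_zeroes infix_zeroes
instance (values : List (String × Int)) (leading_zeroes : Bool) (trailing_zeroes : Bool) (infix_zeroes : Bool) (out : List (String × Int)) : Decidable (Spec_keep_specified_zeroes_py values leading_zeroes trailing_zeroes infix_zeroes out) := by unfold Spec_keep_specified_zeroes_py; infer_instance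

-- ===== CLAIM (what is proved, stated in full; the proofs are below) =====
def Claim_equal_keep_specified_zeroes_py : Prop := ∀ (values : List (String × Int)) (leading_zeroes : Bool) (trailing_zeroes : Bool) (infix_zeroes : Bool), Dom_keep_specified_zeroes_py values leading_zeroes trailing_zeroes infix_zeroes → Spec_keep_specified_zeroes_py values leading_zeroes trailing_zeroes infix_zeroes (keep_specified_zeroes_py values leading_zeroes trailing_zeroes infix_zeroes)

-- ===== LEMMAS AND PROOFS =====

-- proof-only: does a non-zero value occur in the list?
def pvAnyNZ (l : List (String × Int)) : Bool := l.any (fun p => p.2 != 0)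

-- proof-only: recursive form of B's forward tagging (pair, nz-right-of-it)
def pvTagRec : List (String × Int) → List ((String × Int) × Bool)
  | [] => []
  | p :: rest => (p, pvAnyNZ rest) :: pvTagRec rest

-- proof-only: tagging in traversal order with running "seen" flag
def pvTagFwd : List (String × Int) → Bool → List ((String × Int) × Bool)
  | [], _ => []
  | p :: rest, s => (p, s) :: pvTagFwd rest (s || p.2 != 0)

-- proof-only: fused recursive form of B's two scans
def pvGo (L T I : Bool) : List (String × Int) → Bool → List (String × Int)
  | [], _ => []
  | p :: rest, s =>
      (if p.2 != 0 || ((!s && pvAnyNZ rest && L) || (s && pvAnyNZ rest && I)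
          || (s && !(pvAnyNZ rest) && T) || (!s && !(pvAnyNZ rest) && (L || T || I)))
       then [p] else [])
      ++ pvGo L T I rest (s || p.2 != 0)

lemma pvAnyNZ_cons (p : String × Int) (rest : List (String × Int)) :
    pvAnyNZ (p :: rest) = ((p.2 != 0) || pvAnyNZ rest) := by
  simp [pvAnyNZ]

-- the per-element keep condition A's loop implements (proof-only helper)
def pvKeep (L T I : Bool) (fk lk : Nat) (x : Int × String × Int) : Bool :=
  (x.2.2 != 0) || ((decide (x.1 < (fk : Int)) && L) || (decide ((lk : Int) < x.1) && T)
    || ((decide ((fk : Int) < x.1) && decide (x.1 < (lk : Int))) && I))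

lemma mem_pvNZ (values : List (String × Int)) (i : Int) :
    i ∈ pvNZ values ↔ ∃ k : Nat, ∃ _ : k < values.length, i = k ∧ (values[k]).2 ≠ 0 := by
  simp only [pvNZ, List.mem_map, List.mem_filter, PySem.List.mem_enumerate_iff]
  constructor
  · rintro ⟨p, ⟨⟨k, hk, rfl⟩, hnz⟩, rfl⟩
    exact ⟨k, hk, by simp, by simpa using hnz⟩
  · rintro ⟨k, hk, rfl, hnz⟩
    exact ⟨(k, values[k]), ⟨⟨k, hk, by simp⟩, by simpa using hnz⟩, rfl⟩

lemma pvNZ_pairwise (values : List (String × Int)) :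
    (pvNZ values).Pairwise (· < ·) := by
  apply List.Pairwise.map
  · exact fun a b h => h
  · exact (PySem.List.pairwise_lt_enumerate values 0).filter _

lemma le_getLastD_of_sorted {rest : List Int} {f : Int}
    (hp : (f :: rest).Pairwise (· < ·)) :
    ∀ x ∈ f :: rest, x ≤ rest.getLastD f := by
  induction rest generalizing f with
  | nil => intro x hx; simp at hx; simp [hx]
  | cons a t ih =>
    intro x hx
    have hp' : (a :: t).Pairwise (· < ·) := hp.of_cons
    have hfa : f < a := (List.pairwise_cons.1 hp).1 a (by simp)
    rw [List.getLastD_cons]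
    rcases List.mem_cons.1 hx with rfl | hx'
    · exact le_trans (le_of_lt hfa) (ih hp' a (by simp))
    · exact ih hp' x hx'

lemma filter_snd_enumerate {α : Type} (v : List α) (s : Int) (p : Int × α → Bool)
    (q : α → Bool) (hpq : ∀ x, p x = q x.2) :
    ((PySem.List.enumerate v s).filter p).map Prod.snd = v.filter q := by
  have hp : p = fun x => q x.2 := funext hpq
  subst hp
  conv_rhs => rw [← PySem.List.map_snd_enumerate v s]
  rw [List.filter_map]
  rfl

-- B's backward fold computes pvTagFwd of the traversed list
lemma foldl_tagstep (m : List (String × Int)) (acc : List ((String × Int) × Bool)) (s : Bool) :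
    m.foldl (fun (st : List ((String × Int) × Bool) × Bool) pair =>
        (st.1 ++ [(pair, st.2)], st.2 || pair.2 != 0)) (acc, s)
    = (acc ++ pvTagFwd m s, s || pvAnyNZ m) := by
  induction m generalizing acc s with
  | nil => simp [pvTagFwd, pvAnyNZ]
  | cons p rest ih =>
    simp only [List.foldl_cons, ih]
    simp [pvTagFwd, pvAnyNZ, Bool.or_assoc]

lemma pvTagFwd_append_singleton (m : List (String × Int)) (p : String × Int) (s : Bool) :
    pvTagFwd (m ++ [p]) s = pvTagFwd m s ++ [(p, s || pvAnyNZ m)] := by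
  induction m generalizing s with
  | nil => simp [pvTagFwd, pvAnyNZ]
  | cons q rest ih =>
    simp only [List.cons_append, pvTagFwd, ih, pvAnyNZ, List.any_cons]
    cases s <;> cases h : (q.2 != 0) <;> simp [pvAnyNZ]

lemma tagFwd_reverse (values : List (String × Int)) :
    (pvTagFwd values.reverse false).reverse = pvTagRec values := by
  induction values with
  | nil => simp [pvTagFwd, pvTagRec]
  | cons p rest ih =>
    rw [pvTagRec, ← ih, List.reverse_cons, pvTagFwd_append_singleton]
    simp [pvAnyNZ]

-- B's forward fold over the tagged list is pvGo
lemma foldl_fstep (L T I : Bool) (values : List (String × Int))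
    (acc : List (String × Int)) (s : Bool) :
    (pvTagRec values).foldl
      (fun (st : List (String × Int) × Bool) x =>
        if x.1.2 != 0 then (st.1 ++ [x.1], true)
        else
          let keep := (!st.2 && x.2 && L) || (st.2 && x.2 && I)
            || (st.2 && !x.2 && T) || (!st.2 && !x.2 && (L || T || I))
          (if keep then st.1 ++ [x.1] else st.1, st.2)) (acc, s)
    = (acc ++ pvGo L T I values s, s || pvAnyNZ values) := by
  induction values generalizing acc s with
  | nil => simp [pvTagRec, pvGo, pvAnyNZ]
  | cons p rest ih =>
    simp only [pvTagRec, List.foldl_cons]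
    by_cases hp : (p.2 != 0) = true
    · simp only [hp, if_true, ih]
      simp [pvGo, hp, pvAnyNZ, Bool.or_assoc]
    · have hp' : (p.2 != 0) = false := by simpa using hp
      simp only [hp', Bool.false_eq_true, if_false, ih]
      simp only [pvGo, hp', Bool.false_or, Bool.or_false, pvAnyNZ_cons]
      by_cases hk : ((!s && pvAnyNZ rest && L) || (s && pvAnyNZ rest && I)
          || (s && !(pvAnyNZ rest) && T) || (!s && !(pvAnyNZ rest) && (L || T || I))) = true
      · simp [hk, List.append_assoc]
      · have hk' := eq_false_of_ne_true hk
        simp [hk']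

lemma alt_eq_pvGo (values : List (String × Int)) (L T I : Bool) :
    keep_specified_zeroes_py_alt values L T I = pvGo L T I values false := by
  unfold keep_specified_zeroes_py_alt
  rw [foldl_tagstep]
  simp only [List.nil_append]
  rw [tagFwd_reverse, foldl_fstep]
  simp

-- pvGo over an all-zero prefix keeps it as a block
lemma pvGo_zero_prefix (L T I : Bool) (Z m : List (String × Int)) (s : Bool)
    (hz : ∀ p ∈ Z, p.2 = 0) :
    pvGo L T I (Z ++ m) s
      = (if ((!s && pvAnyNZ m && L) || (s && pvAnyNZ m && I)
          || (s && !(pvAnyNZ m) && T) || (!s && !(pvAnyNZ m) && (L || T || I)))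
         then Z else []) ++ pvGo L T I m s := by
  induction Z with
  | nil => simp
  | cons p Z' ih =>
    have hp : p.2 = 0 := hz p (by simp)
    have hz' : ∀ q ∈ Z', q.2 = 0 := fun q hq => hz q (by simp [hq])
    have hZ'nz : pvAnyNZ Z' = false := by
      simp only [pvAnyNZ, List.any_eq_false]
      intro q hq; simpa using hz' q hq
    have hanz : pvAnyNZ (Z' ++ m) = pvAnyNZ m := by
      unfold pvAnyNZ at hZ'nz ⊢
      simp [List.any_append, hZ'nz]
    simp only [List.cons_append, pvGo, hanz, hp,
      show ((0 : Int) != 0) = false by rfl, Bool.false_or, Bool.or_false]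
    rw [ih hz']
    by_cases hk : ((!s && pvAnyNZ m && L) || (s && pvAnyNZ m && I)
        || (s && !(pvAnyNZ m) && T) || (!s && !(pvAnyNZ m) && (L || T || I))) = true
    · simp [hk]
    · have hk' := eq_false_of_ne_true hk
      simp [hk']

-- pvGo distributes over an append whose right part is all zero
lemma pvGo_append_zright (L T I : Bool) (xs ys : List (String × Int)) (s : Bool)
    (hy : pvAnyNZ ys = false) :
    pvGo L T I (xs ++ ys) s = pvGo L T I xs s ++ pvGo L T I ys (s || pvAnyNZ xs) := by
  induction xs generalizing s with
  | nil => simp [pvAnyNZ, pvGo]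
  | cons p xs' ih =>
    have hanz : pvAnyNZ (xs' ++ ys) = pvAnyNZ xs' := by
      unfold pvAnyNZ at hy ⊢
      simp [List.any_append, hy]
    simp only [List.cons_append, pvGo, hanz, ih]
    rw [List.append_assoc]
    congr 2
    simp [pvAnyNZ, Bool.or_assoc]

-- pvGo with nz_left already true over a list whose last element is non-zero is the infix filter
lemma pvGo_mid_true (L T I : Bool) :
    ∀ (m : List (String × Int)) (last : String × Int),
      m.getLast? = some last → last.2 ≠ 0 →
      pvGo L T I m true = m.filter (fun p => p.2 != 0 || I) := by
  intro m
  induction m with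
  | nil => intro last h _; simp at h
  | cons q rest ih =>
    intro last hlast hnz
    cases rest with
    | nil =>
      have hql : q = last := by simpa using hlast
      subst hql
      have hqb : (q.2 != 0) = true := by simpa using hnz
      simp [pvGo, hqb, pvAnyNZ, List.filter_cons]
    | cons r t =>
      have hlast' : (r :: t).getLast? = some last := by
        rw [← hlast, List.getLast?_cons_cons]
      have hmem : last ∈ r :: t := List.mem_of_getLast? hlast'
      have hanz : pvAnyNZ (r :: t) = true := by
        simp only [pvAnyNZ, List.any_eq_true]
        exact ⟨last, hmem, by simpa using hnz⟩
      have hrec := ih last hlast' hnz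
      rw [pvGo, Bool.true_or, hrec, hanz]
      by_cases hq : (q.2 != 0) = true
      · simp [hq, List.filter_cons]
      · have hq' : (q.2 != 0) = false := by simpa using hq
        simp only [hq', Bool.false_or, Bool.not_true, Bool.false_and, Bool.and_true,
          Bool.true_and, Bool.and_false, Bool.or_false, Bool.false_or, List.filter_cons]
        cases I <;> simp

-- pvGo from a fresh state over [first-nonzero … last-nonzero] is the infix filter
lemma pvGo_mid (L T I : Bool) (m : List (String × Int)) (h0 : m ≠ [])
    (hhead : ∀ h, m.head? = some h → h.2 ≠ 0)
    (hlast : ∀ z, m.getLast? = some z → z.2 ≠ 0) :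
    pvGo L T I m false = m.filter (fun p => p.2 != 0 || I) := by
  cases m with
  | nil => exact absurd rfl h0
  | cons p rest =>
    have hp : p.2 ≠ 0 := hhead p (by simp)
    have hpb : (p.2 != 0) = true := by simpa using hp
    cases rest with
    | nil => simp [pvGo, hpb, pvAnyNZ, List.filter_cons]
    | cons r t =>
      obtain ⟨z, hz⟩ : ∃ z, (r :: t).getLast? = some z := by
        cases h : (r :: t).getLast? with
        | none => simp at h
        | some z => exact ⟨z, rfl⟩
      have hznz : z.2 ≠ 0 := hlast z (by rw [← hz, List.getLast?_cons_cons])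
      rw [pvGo, Bool.false_or, hpb, pvGo_mid_true L T I (r :: t) z hz hznz]
      simp [List.filter_cons, hpb]

theorem keep_specified_zeroes_py_spec' :
    ∀ (values : List (String × Int)) (L T I : Bool),
      keep_specified_zeroes_py values L T I = keep_specified_zeroes_py_alt values L T I := by
  intro values L T I
  rw [alt_eq_pvGo]
  unfold keep_specified_zeroes_py
  cases h : pvNZ values with
  | nil =>
    -- all values zero
    have hz : ∀ p ∈ values, p.2 = 0 := by
      intro p hp
      obtain ⟨k, hk, rfl⟩ := List.mem_iff_getElem.1 hp
      by_contra hnz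
      have hmem := (mem_pvNZ values (k : Int)).2 ⟨k, hk, rfl, hnz⟩
      rw [h] at hmem
      exact absurd hmem (List.not_mem_nil)
    have := pvGo_zero_prefix L T I values [] false hz
    rw [List.append_nil] at this
    rw [this]
    have hae : pvAnyNZ ([] : List (String × Int)) = false := by simp [pvAnyNZ]
    rw [hae]
    cases L <;> cases T <;> cases I <;> simp [pvGo]
  | cons f rest =>
    dsimp only
    -- facts about the first and last non-zero index
    obtain ⟨fk, hfkn, hfeq, hfnz⟩ := (mem_pvNZ values f).1 (by rw [h]; exact List.mem_cons_self ..)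
    subst hfeq
    have hlmem : rest.getLastD (fk : Int) ∈ pvNZ values := by
      rw [h]; exact List.getLastD_mem_cons ..
    obtain ⟨lk, hlkn, hleq, hlnz⟩ := (mem_pvNZ values _).1 hlmem
    have hpw := pvNZ_pairwise values
    rw [h] at hpw
    have hmin : ∀ x ∈ pvNZ values, (fk : Int) ≤ x := by
      rw [h]; intro x hx
      rcases List.mem_cons.1 hx with rfl | hx'
      · exact le_refl _
      · exact le_of_lt ((List.pairwise_cons.1 hpw).1 x hx')
    have hmax : ∀ x ∈ pvNZ values, x ≤ rest.getLastD (fk : Int) := by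
      rw [h]; exact le_getLastD_of_sorted hpw
    have hfk_le_lk : fk ≤ lk := by
      have := hmin _ hlmem; rw [hleq] at this; exact_mod_cast this
    have hzlow : ∀ k : Nat, (hk : k < values.length) → k < fk → (values[k]).2 = 0 := by
      intro k hk hlt; by_contra hnz
      have hm := hmin _ ((mem_pvNZ values (k : Int)).2 ⟨k, hk, rfl, hnz⟩)
      have : fk ≤ k := by exact_mod_cast hm
      omega
    have hzhigh : ∀ k : Nat, (hk : k < values.length) → lk < k → (values[k]).2 = 0 := by
      intro k hk hlt; by_contra hnz
      have hm := hmax _ ((mem_pvNZ values (k : Int)).2 ⟨k, hk, rfl, hnz⟩)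
      rw [hleq] at hm
      have : k ≤ lk := by exact_mod_cast hm
      omega
    rw [hleq]
    -- segment decomposition of values
    set Z1 := values.take fk with hZ1
    set M := (values.drop fk).take (lk + 1 - fk) with hM
    set Z2 := values.drop (lk + 1) with hZ2
    have hv1len : Z1.length = fk := by simp [hZ1]; omega
    have hv2len : M.length = lk + 1 - fk := by simp [hM]; omega
    have hsplit : values = Z1 ++ (M ++ Z2) := by
      rw [hZ1, hM, hZ2]
      conv_lhs => rw [← List.take_append_drop fk values]
      congr 1
      conv_lhs => rw [← List.take_append_drop (lk + 1 - fk) (values.drop fk)]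
      congr 1
      rw [List.drop_drop]
      congr 1
      omega
    -- element facts about the segments
    have hZ1z : ∀ p ∈ Z1, p.2 = 0 := by
      intro p hp
      obtain ⟨j, hj, rfl⟩ := List.mem_iff_getElem.1 hp
      rw [hv1len] at hj
      have : Z1[j] = values[j]'(by omega) := by
        simp [hZ1, List.getElem_take]
      rw [this]
      exact hzlow j (by omega) hj
    have hZ2z : ∀ p ∈ Z2, p.2 = 0 := by
      intro p hp
      obtain ⟨j, hj, rfl⟩ := List.mem_iff_getElem.1 hp
      simp only [hZ2, List.length_drop] at hj
      have : Z2[j]'(by simpa [hZ2] using hj) = values[lk + 1 + j]'(by omega) := by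
        simp [hZ2, List.getElem_drop]
      rw [this]
      exact hzhigh (lk + 1 + j) (by omega) (by omega)
    have hMne : M ≠ [] := by
      have : 0 < M.length := by rw [hv2len]; omega
      exact List.ne_nil_of_length_pos this
    have hM0 : M[0]'(by rw [hv2len]; omega) = values[fk] := by
      simp [hM, List.getElem_take, List.getElem_drop]
    have hhead? : M.head? = some (values[fk]'hfkn) := by
      rw [List.head?_eq_getElem?, hM, List.getElem?_take, if_pos (by omega),
        List.getElem?_drop]
      simp [List.getElem?_eq_getElem, hfkn]
    have hlast? : M.getLast? = some (values[lk]'hlkn) := by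
      rw [List.getLast?_eq_getElem?, hv2len, hM, List.getElem?_take, if_pos (by omega),
        List.getElem?_drop]
      have he : fk + (lk + 1 - fk - 1) = lk := by omega
      rw [he, List.getElem?_eq_getElem hlkn]
    have hheadP : ∀ hh, M.head? = some hh → hh.2 ≠ 0 := by
      intro hh e; rw [hhead?] at e; exact (Option.some.inj e) ▸ hfnz
    have hlastP : ∀ z, M.getLast? = some z → z.2 ≠ 0 := by
      intro z e; rw [hlast?] at e; exact (Option.some.inj e) ▸ hlnz
    have hanzM : pvAnyNZ M = true := by
      have hM0mem : values[fk] ∈ M := by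
        rw [← hM0]; exact List.getElem_mem _
      simp only [pvAnyNZ, List.any_eq_true]
      exact ⟨_, hM0mem, by simpa using hfnz⟩
    have hanzZ2 : pvAnyNZ Z2 = false := by
      simp only [pvAnyNZ, List.any_eq_false]
      intro p hp; simpa using hZ2z p hp
    have hanzMZ : pvAnyNZ (M ++ Z2) = true := by
      unfold pvAnyNZ at hanzM ⊢
      simp [List.any_append, hanzM]
    -- B's state machine produces the three filtered segments
    have hBgo : pvGo L T I values false
        = Z1.filter (fun _ => L)
          ++ (M.filter (fun p => p.2 != 0 || I) ++ Z2.filter (fun _ => T)) := by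
      conv_lhs => rw [hsplit]
      rw [pvGo_zero_prefix L T I Z1 (M ++ Z2) false hZ1z, hanzMZ,
          pvGo_append_zright L T I M Z2 false hanzZ2, hanzM,
          pvGo_mid L T I M hMne hheadP hlastP]
      have hZ2go : pvGo L T I Z2 (false || true) = Z2.filter (fun _ => T) := by
        have hz := pvGo_zero_prefix L T I Z2 [] true hZ2z
        rw [List.append_nil] at hz
        rw [show (false || true) = true from rfl, hz]
        have hae : pvAnyNZ ([] : List (String × Int)) = false := by simp [pvAnyNZ]
        rw [hae]
        cases T <;> simp [pvGo]
      rw [hZ2go]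
      cases L <;> simp
    rw [hBgo]
    -- A's fold is a filter
    have hstep :
        (fun (result : List (String × Int)) (x : Int × String × Int) =>
          if x.2.2 ≠ 0 then result ++ [x.2]
          else
            let is_leading := decide (x.1 < (fk : Int))
            let is_trailing := decide ((lk : Int) < x.1)
            let is_infix := decide ((fk : Int) < x.1) && decide (x.1 < (lk : Int))
            if (is_leading && L) || (is_trailing && T) || (is_infix && I)
            then result ++ [x.2] else result)
        = fun result x => if pvKeep L T I fk lk x then result ++ [x.2] else result := by
      funext r x
      by_cases hx : x.2.2 = 0 <;> simp [pvKeep, hx]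
    rw [hstep, PySem.List.foldl_append_if]
    conv_lhs => rw [hsplit]
    rw [PySem.List.enumerate_append, PySem.List.enumerate_append,
        List.filter_append, List.filter_append, List.map_append, List.map_append]
    rw [hv1len, hv2len,
        show ((0 : Int) + ((fk : Nat) : Int) + ((lk + 1 - fk : Nat) : Int)) = ((lk + 1 : Nat) : Int) by push_cast; omega,
        show ((0 : Int) + ((fk : Nat) : Int)) = ((fk : Nat) : Int) by ring]
    simp only [List.nil_append]
    congr 1
    · -- leading segment: all zero values, keep = L
      rw [List.filter_congr (q := fun _ => L) ?_]
      case _ => exact filter_snd_enumerate _ _ _ _ (fun x => rfl)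
      intro x hx
      obtain ⟨j, hj, rfl⟩ := (PySem.List.mem_enumerate_iff _ _ _).1 hx
      rw [hv1len] at hj
      have hzj : (Z1[j]'(by rw [hv1len]; omega)).2 = 0 :=
        hZ1z _ (List.getElem_mem _)
      have c1 : ((j : Nat) : Int) < ((fk : Nat) : Int) := by exact_mod_cast hj
      have c2 : ¬ (((lk : Nat) : Int) < ((j : Nat) : Int)) := by push_cast; omega
      have c3 : ¬ (((fk : Nat) : Int) < ((j : Nat) : Int)) := by push_cast; omega
      simp [pvKeep, hzj, c1, c2, c3]
    congr 1
    · -- middle segment: keep = (value ≠ 0 or I)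
      rw [List.filter_congr (q := fun x => x.2.2 != 0 || I) ?_]
      case _ =>
        exact filter_snd_enumerate _ _ _ (fun p : String × Int => p.2 != 0 || I) (fun x => rfl)
      intro x hx
      obtain ⟨j, hj, rfl⟩ := (PySem.List.mem_enumerate_iff _ _ _).1 hx
      rw [hv2len] at hj
      have hMj : M[j]'(by rw [hv2len]; omega) = values[fk + j]'(by omega) := by
        simp [hM, List.getElem_take, List.getElem_drop]
      by_cases hv : (values[fk + j]'(by omega)).2 = 0
      · have c3 : fk < fk + j := by
          by_contra hc
          have he : j = 0 := by omega
          subst he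
          simp at hv
          exact hfnz hv
        have c4 : fk + j < lk := by
          by_contra hc
          have he : lk = fk + j := by omega
          subst he
          exact hlnz hv
        have d1 : ¬ ((fk : Int) + (j : Nat) < (fk : Int)) := by omega
        have d2 : ¬ ((lk : Int) < (fk : Int) + (j : Nat)) := by omega
        have d3 : (fk : Int) < (fk : Int) + (j : Nat) := by omega
        have d4 : (fk : Int) + (j : Nat) < (lk : Int) := by omega
        simp [pvKeep, hMj, hv, d1, d2, d3, d4]
      · have hb : ((M[j]'(by rw [hv2len]; omega)).2 != 0) = true := by
          rw [hMj]; simpa using hv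
        simp only [pvKeep, hMj]
        have hb' : ((values[fk + j]'(by omega)).2 != 0) = true := by simpa using hv
        simp [hb']
    · -- trailing segment: all zero values, keep = T
      rw [List.filter_congr (q := fun _ => T) ?_]
      case _ => exact filter_snd_enumerate _ _ _ _ (fun x => rfl)
      intro x hx
      obtain ⟨j, hj, rfl⟩ := (PySem.List.mem_enumerate_iff _ _ _).1 hx
      have hzj : (Z2[j]'hj).2 = 0 := hZ2z _ (List.getElem_mem _)
      have e1 : ¬ ((lk : Int) + 1 + (j : Int) < (fk : Int)) := by omega
      have e2 : (lk : Int) < (lk : Int) + 1 + (j : Int) := by omega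
      have e3 : ¬ ((lk : Int) + 1 + (j : Int) < (lk : Int)) := by omega
      simp [pvKeep, hzj, e1, e2, e3]

-- ===== VERDICT (by name: the statement is the Claim_ definition above) =====
theorem keep_specified_zeroes_py_spec : Claim_equal_keep_specified_zeroes_py := by
  intro values L T I _
  exact keep_specified_zeroes_py_spec' values L T I
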